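-- pv_equiv track=rewrite | github.com/rorre/mai-renderer | mai_renderer/chart_loader.py | _extract_end_position
-- ===== SOURCE A (Python) =====
-- def _extract_end_position(track_str: str) -> int:
--     """
--     Extract the end position from a slide track string.
--
--     Example: "-6[8:5]" -> 6
--     Example: "q7[2:1]" -> 7
--
--     Args:
--         track_str: Slide track string
--
--     Returns:
--         End position or 0 if not found
--     """
--     # Find the last digit before the bracket
--     bracket_pos = track_str.find("[")
--     if bracket_pos == -1:
--         # No bracket, find the last digit
--         bracket_pos = len(track_str)
--
--     last_digit = 0
--     for i in range(bracket_pos):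
--         if track_str[i].isdigit():
--             last_digit = int(track_str[i])
--
--     return last_digit
-- ===== SOURCE B (Python) =====
-- def _extract_end_position(track_str: str) -> int:
--     """Last digit before the first '[' (or in the whole string), scanning backwards."""
--     pos = track_str.find("[")
--     prefix = track_str[:pos] if pos != -1 else track_str
--     for ch in reversed(prefix):
--         if ch.isdigit():
--             return int(ch)
--     return 0
-- ===== Notes on version B (the rewrite author's own statement) =====
-- stated objective: simpler
-- what changed: B scans the pre-bracket prefix in reverse and returns the first digit it meets, instead of A's forward loop that overwrites an accumulator with every digit seen.
import Mathlib
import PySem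

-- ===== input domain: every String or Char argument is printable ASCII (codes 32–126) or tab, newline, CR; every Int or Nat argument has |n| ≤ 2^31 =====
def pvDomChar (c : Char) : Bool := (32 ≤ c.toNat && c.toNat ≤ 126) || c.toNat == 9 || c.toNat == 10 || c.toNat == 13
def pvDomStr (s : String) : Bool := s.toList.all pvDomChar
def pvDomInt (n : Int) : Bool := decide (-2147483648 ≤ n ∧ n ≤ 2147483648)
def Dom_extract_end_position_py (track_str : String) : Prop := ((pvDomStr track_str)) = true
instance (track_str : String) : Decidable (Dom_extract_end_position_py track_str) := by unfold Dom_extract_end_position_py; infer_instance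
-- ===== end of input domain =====

-- B replaces A's forward accumulator loop by a reverse scan of the pre-bracket prefix
-- that returns the first digit it meets (objective: simpler).

-- shared helper: Python's int(ch) applied to a one-character string (both Pythons do this)
def digitInt (c : Char) : Int := (PySem.Int.ofChars? [c]).getD 0

-- ===== PORT A =====
def extract_end_position_py (track_str : String) : Int :=
  let cs := track_str.toList
  let f := PySem.Chars.find cs ['[']
  let bracket_pos : Int := if f = -1 then (cs.length : Int) else f
  (PySem.List.pyRange 0 bracket_pos 1).foldl
    (fun last_digit i =>
      let c := PySem.List.pyGetD cs i ' '
      if PySem.Chars.isdigit c then digitInt c else last_digit) 0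

-- ===== PORT B =====
-- the reverse for-loop with early return: first digit wins, 0 if none
def revScan : List Char → Int
  | [] => 0
  | c :: rest => if PySem.Chars.isdigit c then digitInt c else revScan rest

def extract_end_position_py_alt (track_str : String) : Int :=
  let cs := track_str.toList
  let pos := PySem.Chars.find cs ['[']
  let pre := if pos ≠ -1 then PySem.List.slice cs none (some pos) else cs
  revScan pre.reverse

-- ===== PRECONDITION & SPEC =====
def Spec_extract_end_position_py (track_str : String) (out : Int) : Prop := out = extract_end_position_py_alt track_str
instance (track_str : String) (out : Int) : Decidable (Spec_extract_end_position_py track_str out) := by unfold Spec_extract_end_position_py; infer_instance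

-- ===== CLAIM (what is proved, stated in full; the proofs are below) =====
def Claim_equal_extract_end_position_py : Prop := ∀ (track_str : String), Dom_extract_end_position_py track_str → Spec_extract_end_position_py track_str (extract_end_position_py track_str)

-- ===== LEMMAS AND PROOFS =====

lemma foldl_step_reverse (l : List Char) (acc : Int) :
    l.foldl (fun last c => if PySem.Chars.isdigit c then digitInt c else last) acc
      = (l.reverse.foldr (fun c last => if PySem.Chars.isdigit c then digitInt c else last) acc) := by
  exact (List.foldr_reverse (l := l) (f := fun c last => if PySem.Chars.isdigit c then digitInt c else last) (b := acc)).symm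

lemma revScan_eq_foldr0 (l : List Char) :
    revScan l = l.foldr (fun c last => if PySem.Chars.isdigit c then digitInt c else last) 0 := by
  induction l with
  | nil => rfl
  | cons c rest ih => by_cases h : PySem.Chars.isdigit c <;> simp [revScan, h, ih]

-- A's index loop over range(n) is the element fold over the take-n prefix
lemma fold_range_take (cs : List Char) (n : Nat) (hn : n ≤ cs.length) (acc : Int) :
    (PySem.List.pyRange 0 (n : Int) 1).foldl
      (fun last_digit i =>
        if PySem.Chars.isdigit (PySem.List.pyGetD cs i ' ') then digitInt (PySem.List.pyGetD cs i ' ')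
        else last_digit) acc
    = (cs.take n).foldl (fun last c => if PySem.Chars.isdigit c then digitInt c else last) acc := by
  induction n generalizing acc with
  | zero => rfl
  | succ m ih =>
      have hm : m ≤ cs.length := Nat.le_of_succ_le hn
      have hmlt : m < cs.length := hn
      have hrange : PySem.List.pyRange 0 ((m : Int) + 1) 1
          = PySem.List.pyRange 0 (m : Int) 1 ++ [(m : Int)] := by
        simpa using PySem.List.pyRange_one_succ_right (a := 0) (b := (m : Int)) (by positivity)
      have htake : cs.take (m + 1) = cs.take m ++ [cs[m]] :=
        List.take_succ_eq_append_getElem hmlt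
      have hget : PySem.List.pyGetD cs (m : Int) ' ' = cs[m] :=
        PySem.List.pyGetD_ofNat cs m ' ' hmlt
      have hcast : ((m + 1 : Nat) : Int) = (m : Int) + 1 := by push_cast; ring
      rw [hcast, hrange, List.foldl_append, ih hm _, htake, List.foldl_append]
      simp [hget]

-- ===== VERDICT (by name: the statement is the Claim_ definition above) =====
theorem extract_end_position_py_spec : Claim_equal_extract_end_position_py := by
  intro s _
  simp only [Spec_extract_end_position_py, extract_end_position_py, extract_end_position_py_alt]
  have hge : -1 ≤ PySem.Chars.find s.toList ['['] := PySem.Chars.neg_one_le_find s.toList ['[']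
  have hle : PySem.Chars.find s.toList ['['] ≤ s.toList.length :=
    PySem.Chars.find_le_length s.toList ['[']
  by_cases h1 : PySem.Chars.find s.toList ['['] = -1
  · rw [if_pos h1, if_neg (by simp [h1])]
    rw [fold_range_take s.toList s.toList.length le_rfl 0, List.take_length,
        foldl_step_reverse, revScan_eq_foldr0]
  · have h0 : 0 ≤ PySem.Chars.find s.toList ['['] := by omega
    obtain ⟨n, hn⟩ : ∃ n : Nat, PySem.Chars.find s.toList ['['] = (n : Int) :=
      ⟨(PySem.Chars.find s.toList ['[']).toNat, (Int.toNat_of_nonneg h0).symm⟩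
    rw [if_neg h1, if_pos h1, hn]
    rw [hn] at hle
    have hnlen : n ≤ s.toList.length := by exact_mod_cast hle
    rw [fold_range_take s.toList n hnlen 0, PySem.List.slice_to_natCast,
        foldl_step_reverse, revScan_eq_foldr0]
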